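-- pv_equiv track=rewrite | github.com/hubert-thieriot/effective-advocacy-project | efi_corpus/builders/youtube.py | _is_topic_change
-- ===== SOURCE A (Python) =====
-- def _is_topic_change(sentence: str) -> bool:
--     """Detect potential topic changes (simplified heuristic)"""
--     # Look for transition words that often indicate topic changes
--     transition_words = [
--         'however', 'nevertheless', 'meanwhile', 'furthermore', 'moreover',
--         'on the other hand', 'in contrast', 'additionally', 'further',
--         'now', 'then', 'next', 'finally', 'in conclusion'
--     ]
--
--     sentence_lower = sentence.lower()
--     return any(word in sentence_lower for word in transition_words)
-- ===== SOURCE B (Python) =====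
-- _TRANSITION_WORDS = (
--     'however', 'nevertheless', 'meanwhile', 'furthermore',
--     'moreover', 'on the other hand', 'in contrast',
--     'additionally', 'further', 'now', 'then', 'next',
--     'finally', 'in conclusion',
-- )
--
-- def _is_topic_change(sentence: str) -> bool:
--     """Detect potential topic changes (simplified heuristic)"""
--     s = sentence.lower()
--     # single left-to-right scan over positions; at each position test the
--     # transition words as prefixes, instead of one full substring scan per word
--     for i in range(len(s) + 1):
--         if any(s.startswith(w, i) for w in _TRANSITION_WORDS):
--             return True
--     return False
-- ===== Notes on version B (the rewrite author's own statement) =====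
-- stated objective: alternative
-- what changed: Replaced the per-word repeated substring scans ('word in sentence_lower' for each of the 14 words) by a single left-to-right scan over positions of the lowercased sentence, testing the words as prefixes at each position and stopping at the first hit.
import Mathlib
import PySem

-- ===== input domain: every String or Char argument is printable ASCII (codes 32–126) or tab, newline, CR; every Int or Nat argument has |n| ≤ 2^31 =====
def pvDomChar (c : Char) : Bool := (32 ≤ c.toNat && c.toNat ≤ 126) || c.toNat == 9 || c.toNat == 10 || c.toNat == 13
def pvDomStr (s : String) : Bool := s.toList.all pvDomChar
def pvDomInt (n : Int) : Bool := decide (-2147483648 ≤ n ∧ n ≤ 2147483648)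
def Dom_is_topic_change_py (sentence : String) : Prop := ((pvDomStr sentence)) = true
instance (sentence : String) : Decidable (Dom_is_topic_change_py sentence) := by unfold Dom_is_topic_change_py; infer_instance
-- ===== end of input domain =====

-- B replaces A's per-word substring scans by one left-to-right position scan testing the
-- words as prefixes at each position (objective: alternative; same result, total).

-- ===== PORT A =====
-- A: lowercase the sentence, then any(word in sentence_lower for word in transition_words)
def is_topic_change_py (sentence : String) : Bool :=
  let transition_words : List String :=
    ["however", "nevertheless", "meanwhile", "furthermore", "moreover",
     "on the other hand", "in contrast", "additionally", "further",
     "now", "then", "next", "finally", "in conclusion"]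
  let sentence_lower := PySem.Str.lower sentence
  transition_words.any (fun word => PySem.Str.isIn word sentence_lower)

-- ===== PORT B =====
-- B's scan: at the current position test every word as a prefix of the remaining suffix;
-- on failure move one character right (Python's `for i in range(len(s)+1)` with early return).
def pvScan (words : List (List Char)) : List Char → Bool
  | [] => words.any (fun w => PySem.Chars.startswith [] w)
  | c :: t => words.any (fun w => PySem.Chars.startswith (c :: t) w) || pvScan words t

def is_topic_change_py_alt (sentence : String) : Bool :=
  let transition_words : List String :=
    ["however", "nevertheless", "meanwhile", "furthermore", "moreover",
     "on the other hand", "in contrast", "additionally", "further",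
     "now", "then", "next", "finally", "in conclusion"]
  pvScan (transition_words.map String.toList) (PySem.Chars.lower sentence.toList)

-- ===== PRECONDITION & SPEC =====
def Spec_is_topic_change_py (sentence : String) (out : Bool) : Prop := out = is_topic_change_py_alt sentence
instance (sentence : String) (out : Bool) : Decidable (Spec_is_topic_change_py sentence out) := by unfold Spec_is_topic_change_py; infer_instance

-- ===== CLAIM (what is proved, stated in full; the proofs are below) =====
def Claim_equal_is_topic_change_py : Prop := ∀ (sentence : String), Dom_is_topic_change_py sentence → Spec_is_topic_change_py sentence (is_topic_change_py sentence)

-- ===== LEMMAS AND PROOFS =====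

theorem pvScan_eq_true_iff (words : List (List Char)) (cs : List Char) :
    pvScan words cs = true ↔ ∃ w ∈ words, w <:+: cs := by
  induction cs with
  | nil =>
    simp [pvScan, PySem.Chars.startswith_iff, List.prefix_nil, List.infix_nil]
  | cons c t ih =>
    simp only [pvScan, Bool.or_eq_true, List.any_eq_true, PySem.Chars.startswith_iff, ih,
      List.infix_cons_iff]
    constructor
    · rintro (⟨w, hw, hp⟩ | ⟨w, hw, hi⟩)
      · exact ⟨w, hw, Or.inl hp⟩
      · exact ⟨w, hw, Or.inr hi⟩
    · rintro ⟨w, hw, hp | hi⟩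
      · exact Or.inl ⟨w, hw, hp⟩
      · exact Or.inr ⟨w, hw, hi⟩

-- ===== VERDICT (by name: the statement is the Claim_ definition above) =====
theorem is_topic_change_py_spec : Claim_equal_is_topic_change_py := by
  intro sentence _
  unfold Spec_is_topic_change_py
  rw [Bool.eq_iff_iff]
  simp only [is_topic_change_py, is_topic_change_py_alt, List.any_eq_true,
    PySem.Str.isIn_iff_infix, PySem.Str.toList_lower, pvScan_eq_true_iff, List.mem_map]
  constructor
  · rintro ⟨w, hw, hi⟩
    exact ⟨w.toList, ⟨w, hw, rfl⟩, hi⟩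
  · rintro ⟨_, ⟨w, hw, rfl⟩, hi⟩
    exact ⟨w, hw, hi⟩
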